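-- pv_equiv track=rewrite | github.com/dascardonaca/TCC | pythonpasdfrog.py | pastec
-- ===== SOURCE A (Python) =====
-- def pastec(x, y, delim):
-- 	z=x[:]
-- 	y=y[:]
-- 	x=[]
-- 	if len(z)>len(y):
-- 		while (len(z)-len(y))!=0:
-- 			y.append('')
-- 	elif len(y)>len(z):
-- 		while (len(z)-len(y))!=0:
-- 			z.append('')
-- 	for i in range (len(z)):
-- 		if z[i]=='':
-- 			x.append(y[i])
-- 		elif y[i]=='':
-- 			x.append(z[i])
-- 		else:
-- 			x.append(str(z[i])+delim+str(y[i]))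
-- 	return(x)
-- ===== SOURCE B (Python) =====
-- def pastec(x, y, delim):
--     merged = [b if a == '' else (a if b == '' else str(a) + delim + str(b))
--               for a, b in zip(x, y)]
--     n = len(merged)
--     return merged + x[n:] + y[n:]
-- ===== Notes on version B (the rewrite author's own statement) =====
-- stated objective: idiomatic
-- what changed: A copies both lists, physically pads the shorter one with '' in a while loop and then runs a three-way branch over every index of the padded pair; B never pads: it merges only the zipped common prefix with a comprehension and appends the leftover tail of the longer list wholesale by slicing, so the padding phase, index arithmetic and the per-element branch over the tail all disappear.
import Mathlib
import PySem

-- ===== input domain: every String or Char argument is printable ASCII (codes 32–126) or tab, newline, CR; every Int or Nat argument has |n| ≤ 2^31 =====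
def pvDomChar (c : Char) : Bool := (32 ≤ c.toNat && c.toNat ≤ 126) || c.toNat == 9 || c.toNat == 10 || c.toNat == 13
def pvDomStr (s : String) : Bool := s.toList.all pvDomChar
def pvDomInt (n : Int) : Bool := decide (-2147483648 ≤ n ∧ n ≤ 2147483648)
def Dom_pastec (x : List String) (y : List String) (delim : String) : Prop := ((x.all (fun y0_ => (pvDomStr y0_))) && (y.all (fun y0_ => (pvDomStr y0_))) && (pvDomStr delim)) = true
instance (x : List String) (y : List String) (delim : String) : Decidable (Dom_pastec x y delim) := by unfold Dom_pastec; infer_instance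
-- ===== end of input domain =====

-- B drops A's pad-then-index-merge two-phase structure: it merges only the zipped
-- common prefix with the three-way branch and appends the leftover tail of the
-- longer list wholesale by slicing; no padding, no index arithmetic (objective: idiomatic).

-- ===== PORT A =====
-- A's while-loop padding: append '' exactly (len z - len y) times (count is the recursion fuel)
def pvPadA (l : List String) : Nat → List String
  | 0 => l
  | n + 1 => pvPadA (l ++ [""]) n

-- A's merge loop: for i in range(len(z)) with the three-way branch
def pvMergeA (z : List String) (y : List String) (delim : String) : List String :=
  (PySem.List.pyRange 0 z.length 1).foldl (fun acc i =>
    if PySem.List.pyGetD z i "" = "" then acc ++ [PySem.List.pyGetD y i ""]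
    else if PySem.List.pyGetD y i "" = "" then acc ++ [PySem.List.pyGetD z i ""]
    else acc ++ [PySem.List.pyGetD z i "" ++ delim ++ PySem.List.pyGetD y i ""]) []

def pastec (x : List String) (y : List String) (delim : String) : List String :=
  if x.length > y.length then pvMergeA x (pvPadA y (x.length - y.length)) delim
  else if y.length > x.length then pvMergeA (pvPadA x (y.length - x.length)) y delim
  else pvMergeA x y delim

-- ===== PORT B =====
def pastec_alt (x : List String) (y : List String) (delim : String) : List String :=
  let merged := (x.zip y).map (fun p =>
    if p.1 = "" then p.2 else if p.2 = "" then p.1 else p.1 ++ delim ++ p.2)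
  let n : Int := merged.length
  merged ++ PySem.List.slice x (some n) none ++ PySem.List.slice y (some n) none

-- ===== PRECONDITION & SPEC =====
def Spec_pastec (x : List String) (y : List String) (delim : String) (out : List String) : Prop := out = pastec_alt x y delim
instance (x : List String) (y : List String) (delim : String) (out : List String) : Decidable (Spec_pastec x y delim out) := by unfold Spec_pastec; infer_instance

-- ===== CLAIM (what is proved, stated in full; the proofs are below) =====
def Claim_equal_pastec : Prop := ∀ (x : List String) (y : List String) (delim : String), Dom_pastec x y delim → Spec_pastec x y delim (pastec x y delim)

-- ===== LEMMAS AND PROOFS =====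

-- the common three-way branch
def pvF (delim a b : String) : String :=
  if a = "" then b else if b = "" then a else a ++ delim ++ b

theorem pvF_right_empty (delim a : String) : pvF delim a "" = a := by
  unfold pvF; by_cases h : a = "" <;> simp [h]

theorem pvF_left_empty (delim b : String) : pvF delim "" b = b := by
  simp [pvF]

theorem pvPadA_eq_append_replicate (n : Nat) (l : List String) :
    pvPadA l n = l ++ List.replicate n "" := by
  induction n generalizing l with
  | zero => simp [pvPadA]
  | succ k ih => simp [pvPadA, ih, List.replicate_succ, List.append_assoc]

-- A's foldl body appends exactly one element per index: it is a map
theorem pvMergeA_eq_map (z y : List String) (delim : String) :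
    pvMergeA z y delim =
      (PySem.List.pyRange 0 z.length 1).map
        (fun i => pvF delim (PySem.List.pyGetD z i "") (PySem.List.pyGetD y i "")) := by
  unfold pvMergeA
  have hbody : (fun (acc : List String) (i : Int) =>
      if PySem.List.pyGetD z i "" = "" then acc ++ [PySem.List.pyGetD y i ""]
      else if PySem.List.pyGetD y i "" = "" then acc ++ [PySem.List.pyGetD z i ""]
      else acc ++ [PySem.List.pyGetD z i "" ++ delim ++ PySem.List.pyGetD y i ""])
      = (fun acc i => acc ++ [pvF delim (PySem.List.pyGetD z i "") (PySem.List.pyGetD y i "")]) := by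
    funext acc i
    unfold pvF
    split_ifs <;> rfl
  rw [hbody, PySem.List.foldl_append_singleton_eq_map]
  simp

-- the index map over equal-length lists is the structural zipWith
theorem map_range_eq_zipWith (delim : String) :
    ∀ (z y : List String), z.length = y.length →
    (List.range z.length).map (fun k => pvF delim (z.getD k "") (y.getD k ""))
      = List.zipWith (pvF delim) z y := by
  intro z
  induction z with
  | nil => intro y h; simp
  | cons a zs ih =>
    intro y h
    cases y with
    | nil => simp at h
    | cons b ys =>
      simp only [List.length_cons, List.range_succ_eq_map, List.map_cons, List.map_map,
        List.zipWith_cons_cons]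
      rw [← ih ys (by simpa using h)]
      simp [Function.comp]

theorem pvMergeA_eq_zipWith (z y : List String) (delim : String) (h : z.length = y.length) :
    pvMergeA z y delim = List.zipWith (pvF delim) z y := by
  rw [pvMergeA_eq_map, PySem.List.pyRange_zero_nat, List.map_map,
    ← map_range_eq_zipWith delim z y h]
  apply List.map_congr_left
  intro k _
  simp [Function.comp, PySem.List.pyGetD_natCast]

-- map over zip = zipWith (structural induction)
theorem map_zip_eq_zipWith (f : String → String → String) :
    ∀ (x y : List String), (x.zip y).map (fun p => f p.1 p.2) = List.zipWith f x y := by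
  intro x
  induction x with
  | nil => intro y; simp
  | cons a zs ih =>
    intro y
    cases y with
    | nil => simp
    | cons b ys => simp [ih ys]

-- merging against an all-'' pad reproduces the list verbatim
theorem zipWith_replicate_right (delim : String) :
    ∀ (z : List String), List.zipWith (pvF delim) z (List.replicate z.length "") = z := by
  intro z
  induction z with
  | nil => rfl
  | cons a zs ih => simp [List.replicate_succ, pvF_right_empty, ih]

theorem zipWith_replicate_left (delim : String) :
    ∀ (y : List String), List.zipWith (pvF delim) (List.replicate y.length "") y = y := by
  intro y
  induction y with
  | nil => rfl
  | cons b ys ih => simp [List.replicate_succ, pvF_left_empty, ih]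

-- padding the right operand = zip the prefix, then the left tail verbatim
theorem zipWith_pad_right (delim : String) :
    ∀ (y x : List String), y.length ≤ x.length →
    List.zipWith (pvF delim) x (y ++ List.replicate (x.length - y.length) "")
      = List.zipWith (pvF delim) x y ++ x.drop y.length := by
  intro y
  induction y with
  | nil =>
    intro x _
    simpa using zipWith_replicate_right delim x
  | cons b ys ih =>
    intro x h
    cases x with
    | nil => simp at h
    | cons a zs =>
      simp only [List.cons_append, List.zipWith_cons_cons, List.length_cons, List.drop_succ_cons]
      rw [show zs.length + 1 - (ys.length + 1) = zs.length - ys.length from by omega]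
      rw [ih zs (by simpa using h)]

theorem zipWith_pad_left (delim : String) :
    ∀ (x y : List String), x.length ≤ y.length →
    List.zipWith (pvF delim) (x ++ List.replicate (y.length - x.length) "") y
      = List.zipWith (pvF delim) x y ++ y.drop x.length := by
  intro x
  induction x with
  | nil =>
    intro y _
    simpa using zipWith_replicate_left delim y
  | cons a zs ih =>
    intro y h
    cases y with
    | nil => simp at h
    | cons b ys =>
      simp only [List.cons_append, List.zipWith_cons_cons, List.length_cons, List.drop_succ_cons]
      rw [show ys.length + 1 - (zs.length + 1) = ys.length - zs.length from by omega]
      rw [ih ys (by simpa using h)]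

-- B unfolded: zipWith over the prefix, then both dropped tails
theorem pastec_alt_eq (x y : List String) (delim : String) :
    pastec_alt x y delim =
      List.zipWith (pvF delim) x y
        ++ x.drop (min x.length y.length) ++ y.drop (min x.length y.length) := by
  have hzm : (x.zip y).map (fun p =>
      if p.1 = "" then p.2 else if p.2 = "" then p.1 else p.1 ++ delim ++ p.2)
      = List.zipWith (pvF delim) x y := map_zip_eq_zipWith (pvF delim) x y
  have hlen : (List.zipWith (pvF delim) x y).length = min x.length y.length := by simp
  simp only [pastec_alt, hzm, hlen, PySem.List.slice_from_natCast]

-- ===== VERDICT (by name: the statement is the Claim_ definition above) =====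
theorem pastec_spec : Claim_equal_pastec := by
  intro x y delim _
  unfold Spec_pastec pastec
  rw [pastec_alt_eq]
  rcases lt_trichotomy x.length y.length with h | h | h
  · -- y longer: A pads x
    rw [if_neg (by omega), if_pos (by omega), pvPadA_eq_append_replicate,
      pvMergeA_eq_zipWith _ _ _ (by simp; omega),
      zipWith_pad_left delim x y (by omega),
      min_eq_left (le_of_lt h), List.drop_eq_nil_of_le (le_refl x.length)]
    simp
  · -- equal lengths
    rw [if_neg (by omega), if_neg (by omega), pvMergeA_eq_zipWith _ _ _ h,
      min_eq_left (by omega), List.drop_eq_nil_of_le (le_refl x.length),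
      h, List.drop_eq_nil_of_le (le_refl y.length)]
    simp
  · -- x longer: A pads y
    rw [if_pos (by omega), pvPadA_eq_append_replicate,
      pvMergeA_eq_zipWith _ _ _ (by simp; omega),
      zipWith_pad_right delim y x (by omega),
      min_eq_right (le_of_lt h), List.drop_eq_nil_of_le (le_refl y.length)]
    simp
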